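-- pv_equiv track=rewrite | github.com/ShivangVora1206/DSA_Python | CodeQuotient-Problems/solveChallengesToWinGames.py | solveChallenges
-- ===== SOURCE A (Python) =====
-- def solveChallenges(arr, challenges):
--     def binarySearchFirstOccurence(arr, target):
--         res = -1
--         low = 0
--         high = len(arr)-1
--         while low <= high:
--             mid = low+(high-low)//2
--             if arr[mid] == target:
--                 res = mid
--                 high = mid - 1
--             elif arr[mid] > target:
--                 high = mid - 1
--             elif arr[mid] < target:
--                 low = mid + 1
--         return res
--     def binarySearchLastOccurence(arr, target):
--         res = -1
--         low = 0
--         high = len(arr)-1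
--         while low <= high:
--             mid = low+(high-low)//2
--             if arr[mid] == target:
--                 res = mid
--                 low = mid + 1
--             elif arr[mid] > target:
--                 high = mid - 1
--             elif arr[mid] < target:
--                 low = mid + 1
--         return res
--     out = 0
--     for i in challenges:
--         first = binarySearchFirstOccurence(arr, i)
--         last = binarySearchLastOccurence(arr, i)
--         if first != -1 and last != -1:
--             out += last-first+1
--     return out
-- ===== SOURCE B (Python) =====
-- def solveChallenges(arr, challenges):
--     n = len(arr)
--
--     def occurrenceSpan(target):
--         # one shared descent: both of the classic first/last searches walk the same
--         # path until they first hit target, so do that walk once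
--         low, high = 0, n - 1
--         hit = -1
--         while low <= high:
--             mid = (low + high) // 2
--             v = arr[mid]
--             if v < target:
--                 low = mid + 1
--             elif v > target:
--                 high = mid - 1
--             else:
--                 hit = mid
--                 break
--         if hit == -1:
--             return 0
--         # refine the left boundary inside [low, hit-1]
--         first = hit
--         lo, hi = low, hit - 1
--         while lo <= hi:
--             mid = (lo + hi) // 2
--             v = arr[mid]
--             if v < target:
--                 lo = mid + 1
--             elif v > target:
--                 hi = mid - 1
--             else:
--                 first = mid
--                 hi = mid - 1
--         # refine the right boundary inside [hit+1, high]
--         last = hit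
--         lo, hi = hit + 1, high
--         while lo <= hi:
--             mid = (lo + hi) // 2
--             v = arr[mid]
--             if v < target:
--                 lo = mid + 1
--             elif v > target:
--                 hi = mid - 1
--             else:
--                 last = mid
--                 lo = mid + 1
--         return last - first + 1
--
--     cache = {}
--     out = 0
--     for c in challenges:
--         if c not in cache:
--             cache[c] = occurrenceSpan(c)
--         out += cache[c]
--     return out
-- ===== Notes on version B (the rewrite author's own statement) =====
-- stated objective: faster
-- what changed: Instead of two full independent binary searches per challenge, B runs one shared descent until it finds any occurrence (the two classic first/last searches walk identical paths until their first hit), then refines the left and right boundaries on the two disjoint remaining sub-ranges, and memoises the resulting span per distinct challenge value in a dict.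
import Mathlib
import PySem

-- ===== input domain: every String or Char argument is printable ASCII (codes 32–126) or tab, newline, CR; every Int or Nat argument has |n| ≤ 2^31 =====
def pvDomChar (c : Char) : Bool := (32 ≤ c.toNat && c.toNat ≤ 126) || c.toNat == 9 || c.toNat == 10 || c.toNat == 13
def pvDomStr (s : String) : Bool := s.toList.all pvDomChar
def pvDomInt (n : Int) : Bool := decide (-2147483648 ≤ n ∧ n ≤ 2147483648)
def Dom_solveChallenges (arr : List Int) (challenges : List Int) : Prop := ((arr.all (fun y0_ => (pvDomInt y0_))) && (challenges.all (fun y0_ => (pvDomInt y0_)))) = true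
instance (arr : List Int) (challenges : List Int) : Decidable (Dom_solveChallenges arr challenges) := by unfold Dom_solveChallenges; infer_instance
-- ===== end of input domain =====

-- B makes one shared binary descent per distinct challenge (A's two searches walk the same path
-- until the first hit), then refines the two boundaries on disjoint sub-ranges, memoising per
-- challenge value; equal to A on every input.


-- ===== PORT A =====
-- A's `binarySearchFirstOccurence` while loop, as structural recursion on a fuel that only
-- makes the loop total: each iteration shrinks high-low+1 by at least 1, so the initial fuel
-- arr.length (= high-low+1 at the entry call) is never exhausted.  arr[mid] is via pyGetD 0:
-- for the calls solveChallenges makes, mid is always in range, so Python never raises and the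
-- default is never consulted.
def pvBSFirstGo (arr : List Int) (target : Int) : Nat → Int → Int → Int → Int
  | 0, res, _, _ => res
  | fuel + 1, res, low, high =>
    if low ≤ high then
      let mid := low + PySem.Int.floordiv (high - low) 2
      let v := PySem.List.pyGetD arr mid 0
      if v = target then pvBSFirstGo arr target fuel mid low (mid - 1)
      else if v > target then pvBSFirstGo arr target fuel res low (mid - 1)
      else pvBSFirstGo arr target fuel res (mid + 1) high
    else res

-- A's `binarySearchLastOccurence` while loop, same conventions.
def pvBSLastGo (arr : List Int) (target : Int) : Nat → Int → Int → Int → Int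
  | 0, res, _, _ => res
  | fuel + 1, res, low, high =>
    if low ≤ high then
      let mid := low + PySem.Int.floordiv (high - low) 2
      let v := PySem.List.pyGetD arr mid 0
      if v = target then pvBSLastGo arr target fuel mid (mid + 1) high
      else if v > target then pvBSLastGo arr target fuel res low (mid - 1)
      else pvBSLastGo arr target fuel res (mid + 1) high
    else res

def solveChallenges (arr : List Int) (challenges : List Int) : Int :=
  challenges.foldl
    (fun out i =>
      let first := pvBSFirstGo arr i arr.length (-1) 0 ((arr.length : Int) - 1)
      let last := pvBSLastGo arr i arr.length (-1) 0 ((arr.length : Int) - 1)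
      if first ≠ -1 ∧ last ≠ -1 then out + (last - first + 1) else out)
    0

-- ===== PORT B =====
-- Source B's shared descent (the first while loop of occurrenceSpan); `break` is modelled by
-- returning the state (hit, low, high) at the break / loop exit; fuel as for port A.
def pvFindAnyGo (arr : List Int) (target : Int) : Nat → Int → Int → Int × Int × Int
  | 0, low, high => (-1, low, high)
  | fuel + 1, low, high =>
    if low ≤ high then
      let mid := PySem.Int.floordiv (low + high) 2
      let v := PySem.List.pyGetD arr mid 0
      if v < target then pvFindAnyGo arr target fuel (mid + 1) high
      else if v > target then pvFindAnyGo arr target fuel low (mid - 1)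
      else (mid, low, high)
    else (-1, low, high)

-- Source B's left-boundary refinement loop
def pvRefineFirstGo (arr : List Int) (target : Int) : Nat → Int → Int → Int → Int
  | 0, first, _, _ => first
  | fuel + 1, first, lo, hi =>
    if lo ≤ hi then
      let mid := PySem.Int.floordiv (lo + hi) 2
      let v := PySem.List.pyGetD arr mid 0
      if v < target then pvRefineFirstGo arr target fuel first (mid + 1) hi
      else if v > target then pvRefineFirstGo arr target fuel first lo (mid - 1)
      else pvRefineFirstGo arr target fuel mid lo (mid - 1)
    else first

-- Source B's right-boundary refinement loop
def pvRefineLastGo (arr : List Int) (target : Int) : Nat → Int → Int → Int → Int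
  | 0, last, _, _ => last
  | fuel + 1, last, lo, hi =>
    if lo ≤ hi then
      let mid := PySem.Int.floordiv (lo + hi) 2
      let v := PySem.List.pyGetD arr mid 0
      if v < target then pvRefineLastGo arr target fuel last (mid + 1) hi
      else if v > target then pvRefineLastGo arr target fuel last lo (mid - 1)
      else pvRefineLastGo arr target fuel mid (mid + 1) hi
    else last

-- Source B's occurrenceSpan
def pvSpan (arr : List Int) (target : Int) : Int :=
  match pvFindAnyGo arr target arr.length 0 ((arr.length : Int) - 1) with
  | (hit, low, high) =>
    if hit = -1 then 0
    else
      let first := pvRefineFirstGo arr target arr.length hit low (hit - 1)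
      let last := pvRefineLastGo arr target arr.length hit (hit + 1) high
      last - first + 1

def solveChallenges_alt (arr : List Int) (challenges : List Int) : Int :=
  (challenges.foldl
    (fun (st : Int × PySem.Dict Int Int) c =>
      let cache := if st.2.contains c then st.2 else st.2.insert c (pvSpan arr c)
      (st.1 + cache.getD c 0, cache))
    (0, PySem.Dict.empty)).1

-- ===== PRECONDITION & SPEC =====
def Spec_solveChallenges (arr : List Int) (challenges : List Int) (out : Int) : Prop := out = solveChallenges_alt arr challenges
instance (arr : List Int) (challenges : List Int) (out : Int) : Decidable (Spec_solveChallenges arr challenges out) := by unfold Spec_solveChallenges; infer_instance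

-- ===== CLAIM (what is proved, stated in full; the proofs are below) =====
def Claim_equal_solveChallenges : Prop := ∀ (arr : List Int) (challenges : List Int), Dom_solveChallenges arr challenges → Spec_solveChallenges arr challenges (solveChallenges arr challenges)

-- ===== LEMMAS AND PROOFS =====

-- the two midpoint formulas agree: low + (high-low)//2 = (low+high)//2, and its bounds
theorem pvMid_eq (low high : Int) :
    low + PySem.Int.floordiv (high - low) 2 = PySem.Int.floordiv (low + high) 2 := by
  rw [PySem.Int.floordiv_eq_ediv_of_pos (by norm_num),
    PySem.Int.floordiv_eq_ediv_of_pos (by norm_num)]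
  omega

theorem pvMid_bounds (low high : Int) (h : low ≤ high) :
    low ≤ low + PySem.Int.floordiv (high - low) 2 ∧
      low + PySem.Int.floordiv (high - low) 2 ≤ high := by
  rw [PySem.Int.floordiv_eq_ediv_of_pos (by norm_num)]
  omega

-- any two sufficient fuels give the same result (the loop exits before either runs out)
theorem pvBSFirstGo_fuel (arr : List Int) (target : Int) :
    ∀ (f1 f2 : Nat) (res low high : Int), (high - low + 1).toNat ≤ f1 →
      (high - low + 1).toNat ≤ f2 →
      pvBSFirstGo arr target f1 res low high = pvBSFirstGo arr target f2 res low high := by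
  intro f1
  induction f1 with
  | zero =>
    intro f2 res low high h1 h2
    cases f2 with
    | zero => rfl
    | succ m => simp only [pvBSFirstGo]; rw [if_neg (by omega)]
  | succ f1 ih =>
    intro f2 res low high h1 h2
    cases f2 with
    | zero => simp only [pvBSFirstGo]; rw [if_neg (by omega)]
    | succ m =>
      simp only [pvBSFirstGo]
      by_cases hle : low ≤ high
      · rw [if_pos hle, if_pos hle]
        have hmb := pvMid_bounds low high hle
        set mid := low + PySem.Int.floordiv (high - low) 2 with hmid
        set v := PySem.List.pyGetD arr mid 0 with hv
        by_cases hveq : v = target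
        · rw [if_pos hveq, if_pos hveq]
          exact ih m mid low (mid - 1) (by omega) (by omega)
        · rw [if_neg hveq, if_neg hveq]
          by_cases hvgt : v > target
          · rw [if_pos hvgt, if_pos hvgt]
            exact ih m res low (mid - 1) (by omega) (by omega)
          · rw [if_neg hvgt, if_neg hvgt]
            exact ih m res (mid + 1) high (by omega) (by omega)
      · rw [if_neg hle, if_neg hle]

theorem pvBSLastGo_fuel (arr : List Int) (target : Int) :
    ∀ (f1 f2 : Nat) (res low high : Int), (high - low + 1).toNat ≤ f1 →
      (high - low + 1).toNat ≤ f2 →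
      pvBSLastGo arr target f1 res low high = pvBSLastGo arr target f2 res low high := by
  intro f1
  induction f1 with
  | zero =>
    intro f2 res low high h1 h2
    cases f2 with
    | zero => rfl
    | succ m => simp only [pvBSLastGo]; rw [if_neg (by omega)]
  | succ f1 ih =>
    intro f2 res low high h1 h2
    cases f2 with
    | zero => simp only [pvBSLastGo]; rw [if_neg (by omega)]
    | succ m =>
      simp only [pvBSLastGo]
      by_cases hle : low ≤ high
      · rw [if_pos hle, if_pos hle]
        have hmb := pvMid_bounds low high hle
        set mid := low + PySem.Int.floordiv (high - low) 2 with hmid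
        set v := PySem.List.pyGetD arr mid 0 with hv
        by_cases hveq : v = target
        · rw [if_pos hveq, if_pos hveq]
          exact ih m mid (mid + 1) high (by omega) (by omega)
        · rw [if_neg hveq, if_neg hveq]
          by_cases hvgt : v > target
          · rw [if_pos hvgt, if_pos hvgt]
            exact ih m res low (mid - 1) (by omega) (by omega)
          · rw [if_neg hvgt, if_neg hvgt]
            exact ih m res (mid + 1) high (by omega) (by omega)
      · rw [if_neg hle, if_neg hle]

-- B's left refinement is A's first-occurrence loop (same branches, reordered; same midpoint)
theorem pvRefineFirstGo_eq (arr : List Int) (target : Int) :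
    ∀ (fuel : Nat) (res lo hi : Int),
      pvRefineFirstGo arr target fuel res lo hi = pvBSFirstGo arr target fuel res lo hi := by
  intro fuel
  induction fuel with
  | zero => intro res lo hi; rfl
  | succ fuel ih =>
    intro res lo hi
    simp only [pvRefineFirstGo, pvBSFirstGo, ← pvMid_eq]
    by_cases hle : lo ≤ hi
    · rw [if_pos hle, if_pos hle]
      set mid := lo + PySem.Int.floordiv (hi - lo) 2 with hmid
      set v := PySem.List.pyGetD arr mid 0 with hv
      by_cases h1 : v < target
      · rw [if_pos h1, if_neg (by omega : ¬ v = target), if_neg (by omega : ¬ v > target)]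
        exact ih res (mid + 1) hi
      · rw [if_neg h1]
        by_cases h2 : v > target
        · rw [if_pos h2, if_neg (by omega : ¬ v = target), if_pos h2]
          exact ih res lo (mid - 1)
        · rw [if_neg h2, if_pos (by omega : v = target)]
          exact ih mid lo (mid - 1)
    · rw [if_neg hle, if_neg hle]

-- B's right refinement is A's last-occurrence loop
theorem pvRefineLastGo_eq (arr : List Int) (target : Int) :
    ∀ (fuel : Nat) (res lo hi : Int),
      pvRefineLastGo arr target fuel res lo hi = pvBSLastGo arr target fuel res lo hi := by
  intro fuel
  induction fuel with
  | zero => intro res lo hi; rfl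
  | succ fuel ih =>
    intro res lo hi
    simp only [pvRefineLastGo, pvBSLastGo, ← pvMid_eq]
    by_cases hle : lo ≤ hi
    · rw [if_pos hle, if_pos hle]
      set mid := lo + PySem.Int.floordiv (hi - lo) 2 with hmid
      set v := PySem.List.pyGetD arr mid 0 with hv
      by_cases h1 : v < target
      · rw [if_pos h1, if_neg (by omega : ¬ v = target), if_neg (by omega : ¬ v > target)]
        exact ih res (mid + 1) hi
      · rw [if_neg h1]
        by_cases h2 : v > target
        · rw [if_pos h2, if_neg (by omega : ¬ v = target), if_pos h2]
          exact ih res lo (mid - 1)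
        · rw [if_neg h2, if_pos (by omega : v = target)]
          exact ih mid (mid + 1) hi
    · rw [if_neg hle, if_neg hle]

-- the shared descent returns -1 or a hit inside [low, high], with state low ≤ lo, hi ≤ high
theorem pvFindAnyGo_bounds (arr : List Int) (target : Int) :
    ∀ (fuel : Nat) (low high : Int),
      (pvFindAnyGo arr target fuel low high).1 = -1 ∨
        (low ≤ (pvFindAnyGo arr target fuel low high).1 ∧
          (pvFindAnyGo arr target fuel low high).1 ≤ high ∧
          low ≤ (pvFindAnyGo arr target fuel low high).2.1 ∧
          (pvFindAnyGo arr target fuel low high).2.2 ≤ high) := by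
  intro fuel
  induction fuel with
  | zero => intro low high; exact Or.inl rfl
  | succ fuel ih =>
    intro low high
    simp only [pvFindAnyGo]
    by_cases hle : low ≤ high
    · rw [if_pos hle]
      have hmb := pvMid_bounds low high hle
      rw [pvMid_eq] at hmb
      set mid := PySem.Int.floordiv (low + high) 2 with hmid
      set v := PySem.List.pyGetD arr mid 0 with hv
      by_cases h1 : v < target
      · rw [if_pos h1]
        rcases ih (mid + 1) high with h | h
        · exact Or.inl h
        · exact Or.inr ⟨by omega, h.2.1, by omega, h.2.2.2⟩
      · rw [if_neg h1]
        by_cases h2 : v > target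
        · rw [if_pos h2]
          rcases ih low (mid - 1) with h | h
          · exact Or.inl h
          · exact Or.inr ⟨h.1, by omega, h.2.2.1, by omega⟩
        · rw [if_neg h2]
          exact Or.inr ⟨by omega, by omega, le_refl low, le_refl high⟩
    · rw [if_neg hle]
      exact Or.inl rfl

-- with non-negative initial res and low, A's loops never return -1
theorem pvBSFirstGo_nonneg (arr : List Int) (target : Int) :
    ∀ (fuel : Nat) (res low high : Int), 0 ≤ res → 0 ≤ low →
      0 ≤ pvBSFirstGo arr target fuel res low high := by
  intro fuel
  induction fuel with
  | zero => intro res low high hres hlow; exact hres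
  | succ fuel ih =>
    intro res low high hres hlow
    simp only [pvBSFirstGo]
    by_cases hle : low ≤ high
    · rw [if_pos hle]
      have hmb := pvMid_bounds low high hle
      set mid := low + PySem.Int.floordiv (high - low) 2 with hmid
      set v := PySem.List.pyGetD arr mid 0 with hv
      by_cases hveq : v = target
      · rw [if_pos hveq]
        exact ih mid low (mid - 1) (by omega) hlow
      · rw [if_neg hveq]
        by_cases hvgt : v > target
        · rw [if_pos hvgt]
          exact ih res low (mid - 1) hres hlow
        · rw [if_neg hvgt]
          exact ih res (mid + 1) high hres (by omega)
    · rw [if_neg hle]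
      exact hres

theorem pvBSLastGo_nonneg (arr : List Int) (target : Int) :
    ∀ (fuel : Nat) (res low high : Int), 0 ≤ res → 0 ≤ low →
      0 ≤ pvBSLastGo arr target fuel res low high := by
  intro fuel
  induction fuel with
  | zero => intro res low high hres hlow; exact hres
  | succ fuel ih =>
    intro res low high hres hlow
    simp only [pvBSLastGo]
    by_cases hle : low ≤ high
    · rw [if_pos hle]
      have hmb := pvMid_bounds low high hle
      set mid := low + PySem.Int.floordiv (high - low) 2 with hmid
      set v := PySem.List.pyGetD arr mid 0 with hv
      by_cases hveq : v = target
      · rw [if_pos hveq]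
        exact ih mid (mid + 1) high (by omega) (by omega)
      · rw [if_neg hveq]
        by_cases hvgt : v > target
        · rw [if_pos hvgt]
          exact ih res low (mid - 1) hres hlow
        · rw [if_neg hvgt]
          exact ih res (mid + 1) high hres (by omega)
    · rw [if_neg hle]
      exact hres

-- until its first hit, A's first-occurrence search walks exactly B's shared descent
theorem pvBSFirstGo_decomp (arr : List Int) (target : Int) :
    ∀ (fuel : Nat) (low high : Int), 0 ≤ low → (high - low + 1).toNat ≤ fuel →
      pvBSFirstGo arr target fuel (-1) low high =
        (match pvFindAnyGo arr target fuel low high with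
         | (hit, lo, _hi) =>
           if hit = -1 then -1
           else pvBSFirstGo arr target (hit - 1 - lo + 1).toNat hit lo (hit - 1)) := by
  intro fuel
  induction fuel with
  | zero =>
    intro low high hlow hfuel
    rfl
  | succ fuel ih =>
    intro low high hlow hfuel
    simp only [pvBSFirstGo, pvFindAnyGo, ← pvMid_eq]
    by_cases hle : low ≤ high
    · rw [if_pos hle, if_pos hle]
      have hmb := pvMid_bounds low high hle
      set mid := low + PySem.Int.floordiv (high - low) 2 with hmid
      set v := PySem.List.pyGetD arr mid 0 with hv
      by_cases h1 : v < target
      · rw [if_neg (by omega : ¬ v = target), if_neg (by omega : ¬ v > target), if_pos h1]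
        exact ih (mid + 1) high (by omega) (by omega)
      · by_cases h2 : v > target
        · rw [if_neg (by omega : ¬ v = target), if_pos h2, if_neg h1, if_pos h2]
          exact ih low (mid - 1) hlow (by omega)
        · rw [if_pos (by omega : v = target), if_neg h1, if_neg h2]
          simp only
          rw [if_neg (by omega : ¬ mid = -1)]
          exact pvBSFirstGo_fuel arr target fuel (mid - 1 - low + 1).toNat mid low (mid - 1)
            (by omega) (by omega)
    · rw [if_neg hle, if_neg hle]
      rfl

theorem pvBSLastGo_decomp (arr : List Int) (target : Int) :
    ∀ (fuel : Nat) (low high : Int), 0 ≤ low → (high - low + 1).toNat ≤ fuel →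
      pvBSLastGo arr target fuel (-1) low high =
        (match pvFindAnyGo arr target fuel low high with
         | (hit, _lo, hi) =>
           if hit = -1 then -1
           else pvBSLastGo arr target (hi - (hit + 1) + 1).toNat hit (hit + 1) hi) := by
  intro fuel
  induction fuel with
  | zero =>
    intro low high hlow hfuel
    rfl
  | succ fuel ih =>
    intro low high hlow hfuel
    simp only [pvBSLastGo, pvFindAnyGo, ← pvMid_eq]
    by_cases hle : low ≤ high
    · rw [if_pos hle, if_pos hle]
      have hmb := pvMid_bounds low high hle
      set mid := low + PySem.Int.floordiv (high - low) 2 with hmid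
      set v := PySem.List.pyGetD arr mid 0 with hv
      by_cases h1 : v < target
      · rw [if_neg (by omega : ¬ v = target), if_neg (by omega : ¬ v > target), if_pos h1]
        exact ih (mid + 1) high (by omega) (by omega)
      · by_cases h2 : v > target
        · rw [if_neg (by omega : ¬ v = target), if_pos h2, if_neg h1, if_pos h2]
          exact ih low (mid - 1) hlow (by omega)
        · rw [if_pos (by omega : v = target), if_neg h1, if_neg h2]
          simp only
          rw [if_neg (by omega : ¬ mid = -1)]
          exact pvBSLastGo_fuel arr target fuel (high - (mid + 1) + 1).toNat mid (mid + 1) high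
            (by omega) (by omega)
    · rw [if_neg hle, if_neg hle]
      rfl

-- the per-challenge contribution A computes is Source B's occurrenceSpan
theorem pvSpan_eq (arr : List Int) (t : Int) :
    (if pvBSFirstGo arr t arr.length (-1) 0 ((arr.length : Int) - 1) ≠ -1 ∧
        pvBSLastGo arr t arr.length (-1) 0 ((arr.length : Int) - 1) ≠ -1 then
      pvBSLastGo arr t arr.length (-1) 0 ((arr.length : Int) - 1) -
        pvBSFirstGo arr t arr.length (-1) 0 ((arr.length : Int) - 1) + 1
     else 0) = pvSpan arr t := by
  unfold pvSpan
  rw [pvBSFirstGo_decomp arr t arr.length 0 ((arr.length : Int) - 1) le_rfl (by omega),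
    pvBSLastGo_decomp arr t arr.length 0 ((arr.length : Int) - 1) le_rfl (by omega)]
  have hb := pvFindAnyGo_bounds arr t arr.length 0 ((arr.length : Int) - 1)
  rcases hfa : pvFindAnyGo arr t arr.length 0 ((arr.length : Int) - 1) with ⟨hit, lo, hi⟩
  rw [hfa] at hb
  by_cases hhit : hit = -1
  · simp [hhit]
  · simp only [if_neg hhit]
    have hb' : 0 ≤ hit ∧ hit ≤ (arr.length : Int) - 1 ∧ 0 ≤ lo ∧ hi ≤ (arr.length : Int) - 1 := by
      rcases hb with h | h
      · exact absurd h hhit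
      · exact ⟨h.1, h.2.1, h.2.2.1, h.2.2.2⟩
    have h1 : 0 ≤ pvBSFirstGo arr t (hit - 1 - lo + 1).toNat hit lo (hit - 1) :=
      pvBSFirstGo_nonneg arr t _ hit lo (hit - 1) hb'.1 hb'.2.2.1
    have h2 : 0 ≤ pvBSLastGo arr t (hi - (hit + 1) + 1).toNat hit (hit + 1) hi :=
      pvBSLastGo_nonneg arr t _ hit (hit + 1) hi hb'.1 (by omega)
    rw [pvRefineFirstGo_eq, pvRefineLastGo_eq,
      pvBSFirstGo_fuel arr t arr.length (hit - 1 - lo + 1).toNat hit lo (hit - 1)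
        (by omega) (by omega),
      pvBSLastGo_fuel arr t arr.length (hi - (hit + 1) + 1).toNat hit (hit + 1) hi
        (by omega) (by omega),
      if_pos ⟨by omega, by omega⟩]

-- the cached fold of B computes A's fold: the cache only ever stores pvSpan values
theorem pvFold_eq (arr : List Int) : ∀ (cs : List Int) (acc : Int) (cache : PySem.Dict Int Int),
    (∀ k, cache.contains k = true → cache.getD k 0 = pvSpan arr k) →
    (cs.foldl
      (fun (st : Int × PySem.Dict Int Int) c =>
        let cache := if st.2.contains c then st.2 else st.2.insert c (pvSpan arr c)
        (st.1 + cache.getD c 0, cache))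
      (acc, cache)).1 =
    cs.foldl
      (fun out i =>
        let first := pvBSFirstGo arr i arr.length (-1) 0 ((arr.length : Int) - 1)
        let last := pvBSLastGo arr i arr.length (-1) 0 ((arr.length : Int) - 1)
        if first ≠ -1 ∧ last ≠ -1 then out + (last - first + 1) else out)
      acc := by
  intro cs
  induction cs with
  | nil => intro acc cache hinv; rfl
  | cons c cs ih =>
    intro acc cache hinv
    rw [List.foldl_cons, List.foldl_cons]
    have hA : (let first := pvBSFirstGo arr c arr.length (-1) 0 ((arr.length : Int) - 1)
        let last := pvBSLastGo arr c arr.length (-1) 0 ((arr.length : Int) - 1)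
        if first ≠ -1 ∧ last ≠ -1 then acc + (last - first + 1) else acc) =
        acc + pvSpan arr c := by
      show (if pvBSFirstGo arr c arr.length (-1) 0 ((arr.length : Int) - 1) ≠ -1 ∧
          pvBSLastGo arr c arr.length (-1) 0 ((arr.length : Int) - 1) ≠ -1 then
        acc + (pvBSLastGo arr c arr.length (-1) 0 ((arr.length : Int) - 1) -
          pvBSFirstGo arr c arr.length (-1) 0 ((arr.length : Int) - 1) + 1) else acc) =
        acc + pvSpan arr c
      rw [← pvSpan_eq arr c]
      split_ifs <;> omega
    rw [hA]
    by_cases hc : cache.contains c = true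
    · have hB : (let cache2 := if (acc, cache).2.contains c then (acc, cache).2
              else (acc, cache).2.insert c (pvSpan arr c)
          ((acc, cache).1 + cache2.getD c 0, cache2)) = (acc + pvSpan arr c, cache) := by
        show (acc + (if cache.contains c then cache else cache.insert c (pvSpan arr c)).getD c 0,
          if cache.contains c then cache else cache.insert c (pvSpan arr c)) =
          (acc + pvSpan arr c, cache)
        rw [if_pos hc, hinv c hc]
      rw [hB]
      exact ih (acc + pvSpan arr c) cache hinv
    · have hB : (let cache2 := if (acc, cache).2.contains c then (acc, cache).2
              else (acc, cache).2.insert c (pvSpan arr c)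
          ((acc, cache).1 + cache2.getD c 0, cache2)) =
          (acc + pvSpan arr c, cache.insert c (pvSpan arr c)) := by
        show (acc + (if cache.contains c then cache else cache.insert c (pvSpan arr c)).getD c 0,
          if cache.contains c then cache else cache.insert c (pvSpan arr c)) =
          (acc + pvSpan arr c, cache.insert c (pvSpan arr c))
        rw [if_neg hc, PySem.Dict.getD_insert_self]
      rw [hB]
      refine ih (acc + pvSpan arr c) (cache.insert c (pvSpan arr c)) ?_
      intro k hk
      rw [PySem.Dict.contains_insert] at hk
      by_cases hkc : k = c
      · subst hkc
        exact PySem.Dict.getD_insert_self cache k (pvSpan arr k) 0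
      · rw [PySem.Dict.getD_insert_of_ne cache (pvSpan arr c) 0 hkc]
        apply hinv
        simpa [hkc] using hk

-- ===== VERDICT (by name: the statement is the Claim_ definition above) =====
theorem solveChallenges_spec : Claim_equal_solveChallenges := by
  intro arr challenges _hdom
  unfold Spec_solveChallenges solveChallenges solveChallenges_alt
  rw [pvFold_eq arr challenges 0 PySem.Dict.empty ?_]
  intro k hk
  rw [PySem.Dict.contains_empty] at hk
  exact absurd hk (by simp)
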